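-- pv_equiv track=rewrite | github.com/Stvnap/Master_Thesis | Predicter_for_ESM.py | check_dropping_logits_across_cuts
-- ===== SOURCE A (Python) =====
-- def check_dropping_logits_across_cuts(logits_so_far, threshold=2):
--     """
--     Check if logits are dropping consecutively across different cut sizes.
--
--     Args:
--         logits_so_far: List of logit values collected so far for a sequence
--         threshold: Number of consecutive drops to trigger exclusion (default: 2)
--
--     Returns:
--         bool: True if sequence should be dropped (has consecutive drops >= threshold)
--     """
--
--     # if logits length less than threshold + 1, cannot have enough drops. Return early
--     if len(logits_so_far) < threshold + 1:
--         return False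
--
--     # init drop counter
--     consecutive_drops = 0
--
--     # loop through logits and count consecutive drops
--     for i in range(1, len(logits_so_far)):
--         # check if current logit is less than or equal to previous
--         if logits_so_far[i] <= logits_so_far[i - 1]:
--             # add to drop counter
--             consecutive_drops += 1
--             # check if threshold reached, return True
--             if consecutive_drops >= threshold:
--                 return True
--         else:
--             # reset drop counter if not met
--             consecutive_drops = 0
--
--     # if done loop, threshold not met, return False
--     return False
-- ===== SOURCE B (Python) =====
-- def _drop_runs(drops):
--     """Lengths of the maximal runs of True in drops (run-length encoding scan)."""
--     runs = []
--     i = 0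
--     n = len(drops)
--     while i < n:
--         j = i + 1
--         while j < n and drops[j] == drops[i]:
--             j += 1
--         if drops[i]:
--             runs.append(j - i)
--         i = j
--     return runs
--
--
-- def check_dropping_logits_across_cuts(logits_so_far, threshold=2):
--     drops = [b <= a for a, b in zip(logits_so_far, logits_so_far[1:])]
--     return any(r >= threshold for r in _drop_runs(drops))
-- ===== Notes on version B (the rewrite author's own statement) =====
-- stated objective: alternative
-- what changed: Replaces A's single index loop with counter and early return by a three-stage decomposition: build the list of adjacent-pair comparisons with zip, run-length-encode its maximal True runs recursively, and test any(run >= threshold); the redundant len < threshold+1 guard is dropped.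
import Mathlib
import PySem

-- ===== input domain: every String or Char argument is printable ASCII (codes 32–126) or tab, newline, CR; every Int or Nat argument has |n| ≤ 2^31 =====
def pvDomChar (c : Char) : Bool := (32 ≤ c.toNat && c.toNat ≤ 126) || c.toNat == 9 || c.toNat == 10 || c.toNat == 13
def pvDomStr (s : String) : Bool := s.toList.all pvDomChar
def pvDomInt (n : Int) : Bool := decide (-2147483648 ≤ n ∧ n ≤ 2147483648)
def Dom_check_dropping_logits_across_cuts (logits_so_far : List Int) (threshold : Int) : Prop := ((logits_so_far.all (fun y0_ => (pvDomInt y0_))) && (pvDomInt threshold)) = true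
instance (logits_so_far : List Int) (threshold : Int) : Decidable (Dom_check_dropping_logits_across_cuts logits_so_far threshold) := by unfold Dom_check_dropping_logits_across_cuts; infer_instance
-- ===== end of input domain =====

-- B re-decomposes the task: adjacent-comparison list, then run-length encoding, then 'any run ≥ threshold'
-- (objective: alternative decomposition of similar cost; same return value as A on every input).

-- ===== PORT A =====
-- counter loop over indices with early return (the early return is latched in the fold state)
def check_dropping_logits_across_cuts (logits_so_far : List Int) (threshold : Int) : Bool :=
  if (logits_so_far.length : Int) < threshold + 1 then false
  else
    ((PySem.List.pyRange 1 (logits_so_far.length : Int)).foldl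
      (fun st i =>
        if st.1 then st
        else if PySem.List.pyGetD logits_so_far i 0 ≤ PySem.List.pyGetD logits_so_far (i - 1) 0 then
          if threshold ≤ st.2 + 1 then (true, st.2 + 1) else (false, st.2 + 1)
        else (false, 0))
      (false, 0)).1

-- ===== PORT B =====
-- _drop_runs: lengths of the maximal runs of True (run-length encoding scan);
-- the outer while loop is rendered as recursion on the remaining suffix, the inner while as takeWhile
def bRuns : List Bool → List Int
  | [] => []
  | h :: t =>
    let same := (t.takeWhile (fun d => d == h)).length
    let tailRuns := bRuns (t.drop same)
    if h then (1 + (same : Int)) :: tailRuns else tailRuns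
termination_by l => l.length
decreasing_by simp

def check_dropping_logits_across_cuts_alt (logits_so_far : List Int) (threshold : Int) : Bool :=
  let drops := (logits_so_far.zip (PySem.List.slice logits_so_far (some 1) none)).map
      (fun p => decide (p.2 ≤ p.1))
  (bRuns drops).any (fun r => decide (threshold ≤ r))

-- ===== PRECONDITION & SPEC =====
def Spec_check_dropping_logits_across_cuts (logits_so_far : List Int) (threshold : Int) (out : Bool) : Prop := out = check_dropping_logits_across_cuts_alt logits_so_far threshold
instance (logits_so_far : List Int) (threshold : Int) (out : Bool) : Decidable (Spec_check_dropping_logits_across_cuts logits_so_far threshold out) := by unfold Spec_check_dropping_logits_across_cuts; infer_instance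

-- ===== CLAIM (what is proved, stated in full; the proofs are below) =====
def Claim_equal_check_dropping_logits_across_cuts : Prop := ∀ (logits_so_far : List Int) (threshold : Int), Dom_check_dropping_logits_across_cuts logits_so_far threshold → Spec_check_dropping_logits_across_cuts logits_so_far threshold (check_dropping_logits_across_cuts logits_so_far threshold)

-- ===== LEMMAS AND PROOFS =====

-- the adjacent-comparison list both sides are about
def dropsOf (xs : List Int) : List Bool := (xs.zip (xs.drop 1)).map (fun p => decide (p.2 ≤ p.1))

-- A's loop, re-expressed structurally over the comparison list (proved equal to the pyRange fold below)
def aFoldD (th : Int) : List Bool → Bool × Int → Bool × Int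
  | [], st => st
  | d :: ds, st =>
    aFoldD th ds
      (if st.1 then st
       else if d then (if th ≤ st.2 + 1 then (true, st.2 + 1) else (false, st.2 + 1))
       else (false, 0))

-- length of the initial run of `true`
def headRun (ds : List Bool) : Nat := (ds.takeWhile (fun d => d == true)).length

theorem bRuns_nil : bRuns [] = [] := by rw [bRuns.eq_def]

theorem bRuns_cons (h : Bool) (t : List Bool) :
    bRuns (h :: t) =
      (if h then (1 + ((t.takeWhile (fun d => d == h)).length : Int)) ::
          bRuns (t.drop (t.takeWhile (fun d => d == h)).length)
       else bRuns (t.drop (t.takeWhile (fun d => d == h)).length)) := by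
  rw [bRuns.eq_def]

theorem bRuns_false_cons (t : List Bool) : bRuns (false :: t) = bRuns t := by
  rw [bRuns_cons]
  simp only [if_neg (by simp : ¬ (false = true))]
  cases t with
  | nil => simp
  | cons a t' =>
    cases a with
    | true => simp
    | false =>
      rw [List.takeWhile_cons_of_pos (by simp)]
      rw [bRuns_cons]
      simp

theorem bRuns_true_cons (t : List Bool) :
    bRuns (true :: t) = (1 + (headRun t : Int)) :: bRuns (t.drop (headRun t)) := by
  rw [bRuns_cons]
  simp [headRun]

theorem headRun_false_cons (t : List Bool) : headRun (false :: t) = 0 := by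
  simp [headRun]

theorem headRun_true_cons (t : List Bool) : headRun (true :: t) = headRun t + 1 := by
  simp [headRun, List.takeWhile_cons_of_pos]

theorem bRuns_mem_bounds : ∀ (n : Nat) (ds : List Bool), ds.length ≤ n →
    ∀ r ∈ bRuns ds, 1 ≤ r ∧ r ≤ (ds.length : Int) := by
  intro n
  induction n with
  | zero =>
    intro ds hds r hr
    cases ds with
    | nil => rw [bRuns_nil] at hr; simp at hr
    | cons h t => simp at hds
  | succ n ih =>
    intro ds hds r hr
    cases ds with
    | nil => rw [bRuns_nil] at hr; simp at hr
    | cons h t =>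
      cases h with
      | false =>
        rw [bRuns_false_cons] at hr
        have hb := ih t (by simp at hds; omega) r hr
        have h2 := hb.2
        refine ⟨hb.1, ?_⟩
        simp only [List.length_cons]
        push_cast
        omega
      | true =>
        rw [bRuns_true_cons] at hr
        have htw : headRun t ≤ t.length := (List.takeWhile_prefix _).length_le
        rcases List.mem_cons.mp hr with hr | hr
        · subst hr
          refine ⟨by omega, ?_⟩
          simp only [List.length_cons]
          push_cast
          omega
        · have hlen : (t.drop (headRun t)).length ≤ n := by
            simp at hds ⊢; omega
          have hb := ih _ hlen r hr
          have h2 := hb.2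
          rw [List.length_drop] at h2
          refine ⟨hb.1, ?_⟩
          simp only [List.length_cons]
          push_cast
          omega

-- the head-run disjunct is absorbed by the run list itself
theorem absorb (ds : List Bool) (th : Int) :
    (decide (1 ≤ (headRun ds : Int) ∧ th ≤ (headRun ds : Int)) ||
      (bRuns ds).any (fun r => decide (th ≤ r))) =
    (bRuns ds).any (fun r => decide (th ≤ r)) := by
  cases ds with
  | nil => simp [headRun, bRuns_nil]
  | cons h t =>
    cases h with
    | false => simp [headRun_false_cons]
    | true =>
      simp only [headRun_true_cons, bRuns_true_cons, List.any_cons]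
      rw [Bool.eq_iff_iff]
      simp only [Bool.or_eq_true, decide_eq_true_eq]
      constructor
      · rintro (h1 | h2)
        · left; push_cast at h1 ⊢; omega
        · exact h2
      · intro h; right; exact h

theorem aFoldD_latched (th : Int) : ∀ (ds : List Bool) (c : Int), aFoldD th ds (true, c) = (true, c) := by
  intro ds
  induction ds with
  | nil => intro c; rfl
  | cons d t ih => intro c; simp [aFoldD, ih]

-- main invariant: A's loop from counter c vs the run-length view
theorem main_inv (th : Int) : ∀ (ds : List Bool) (c : Int), 0 ≤ c →
    (aFoldD th ds (false, c)).1 =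
      (decide (1 ≤ (headRun ds : Int) ∧ th ≤ c + (headRun ds : Int)) ||
        (bRuns ds).any (fun r => decide (th ≤ r))) := by
  intro ds
  induction ds with
  | nil => intro c _; simp [aFoldD, headRun, bRuns_nil]
  | cons d t ih =>
    intro c hc
    cases d with
    | false =>
      show (aFoldD th t (false, 0)).1 = _
      rw [ih 0 le_rfl, bRuns_false_cons, headRun_false_cons]
      simp only [Nat.cast_zero, zero_add]
      rw [absorb]
      simp
    | true =>
      by_cases hth : th ≤ c + 1
      · show (aFoldD th t (if th ≤ c + 1 then (true, c + 1) else (false, c + 1))).1 = _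
        rw [if_pos hth, aFoldD_latched]
        rw [headRun_true_cons]
        have h0 : (0:Int) ≤ (headRun t : Int) := by positivity
        rw [decide_eq_true (by push_cast; omega :
          (1:Int) ≤ ((headRun t + 1 : Nat) : Int) ∧ th ≤ c + ((headRun t + 1 : Nat) : Int))]
        simp
      · show (aFoldD th t (if th ≤ c + 1 then (true, c + 1) else (false, c + 1))).1 = _
        rw [if_neg hth, ih (c + 1) (by omega)]
        simp only [headRun_true_cons, bRuns_true_cons, List.any_cons]
        cases t with
        | nil =>
          simp only [headRun, List.takeWhile_nil, List.length_nil, Nat.cast_zero, List.drop_nil,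
            bRuns_nil, List.any_nil, Bool.or_false]
          rw [Bool.eq_iff_iff]
          simp only [Bool.or_eq_true, decide_eq_true_eq]
          push_cast
          omega
        | cons a t' =>
          cases a with
          | false =>
            simp only [headRun_false_cons, Nat.cast_zero, List.drop_zero, bRuns_false_cons]
            rw [Bool.eq_iff_iff]
            simp only [Bool.or_eq_true, decide_eq_true_eq, Nat.cast_one, zero_add]
            constructor
            · rintro (⟨h1a, h1b⟩ | h2)
              · exfalso; omega
              · right; right; exact h2
            · rintro (⟨h1a, h1b⟩ | h2 | h3)
              · exfalso; omega
              · exfalso; omega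
              · right; exact h3
          | true =>
            simp only [headRun_true_cons, bRuns_true_cons, List.any_cons, List.drop_succ_cons]
            rw [Bool.eq_iff_iff]
            simp only [Bool.or_eq_true, decide_eq_true_eq]
            constructor
            · rintro (⟨h1a, h1b⟩ | h2 | h3)
              · left; push_cast at h1a h1b ⊢; omega
              · right; left; push_cast at h2 ⊢; omega
              · right; right; exact h3
            · rintro (⟨h1a, h1b⟩ | h2 | h3)
              · left; push_cast at h1a h1b ⊢; omega
              · left; push_cast at h2 ⊢; omega
              · right; right; exact h3

theorem dropsOf_short (l : List Int) (h : l.length ≤ 1) : dropsOf l = [] := by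
  cases l with
  | nil => rfl
  | cons a t =>
    cases t with
    | nil => rfl
    | cons b t' => simp at h

theorem dropsOf_cons₂ (a b : Int) (l : List Int) :
    dropsOf (a :: b :: l) = decide (b ≤ a) :: dropsOf (b :: l) := by
  simp [dropsOf]

-- A's pyRange index loop equals the structural fold over the comparison list
theorem fold_range (xs : List Int) (th : Int) : ∀ (fuel k : Nat), xs.length ≤ k + fuel →
    ∀ st : Bool × Int,
    ((PySem.List.pyRange ((k : Int) + 1) (xs.length : Int)).foldl
      (fun st i =>
        if st.1 then st
        else if PySem.List.pyGetD xs i 0 ≤ PySem.List.pyGetD xs (i - 1) 0 then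
          if th ≤ st.2 + 1 then (true, st.2 + 1) else (false, st.2 + 1)
        else (false, 0))
      st) = aFoldD th (dropsOf (xs.drop k)) st := by
  intro fuel
  induction fuel with
  | zero =>
    intro k hk st
    rw [PySem.List.pyRange_one_eq_nil (by omega)]
    have hnil : xs.drop k = [] := List.drop_eq_nil_of_le (by omega)
    rw [hnil]
    rfl
  | succ fuel ih =>
    intro k hk st
    by_cases hlt : k + 1 < xs.length
    · rw [PySem.List.pyRange_one_cons (by omega)]
      rw [List.foldl_cons]
      have hcast : (k : Int) + 1 + 1 = ((k + 1 : Nat) : Int) + 1 := by omega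
      rw [hcast, ih (k + 1) (by omega)]
      have hk1 : k < xs.length := by omega
      have hd1 : xs.drop k = xs[k] :: xs.drop (k + 1) := List.drop_eq_getElem_cons hk1
      have hd2 : xs.drop (k + 1) = xs[k + 1] :: xs.drop (k + 2) := List.drop_eq_getElem_cons hlt
      rw [hd1, hd2, dropsOf_cons₂]
      conv_rhs => rw [aFoldD]
      congr 1
      have e1 : PySem.List.pyGetD xs ((k : Int) + 1) 0 = xs[k + 1] := by
        have hcc : (k : Int) + 1 = ((k + 1 : Nat) : Int) := by omega
        rw [hcc, PySem.List.pyGetD_natCast, List.getD_eq_getElem _ _ hlt]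
      have e2 : PySem.List.pyGetD xs ((k : Int) + 1 - 1) 0 = xs[k] := by
        have hcc : (k : Int) + 1 - 1 = ((k : Nat) : Int) := by omega
        rw [hcc, PySem.List.pyGetD_natCast, List.getD_eq_getElem _ _ hk1]
      rw [e1, e2]
      by_cases hle : xs[k + 1] ≤ xs[k] <;> simp [hle]
    · rw [PySem.List.pyRange_one_eq_nil (by omega)]
      have hshort : dropsOf (xs.drop k) = [] := dropsOf_short _ (by simp; omega)
      rw [hshort]
      rfl

theorem alt_eq (xs : List Int) (th : Int) :
    check_dropping_logits_across_cuts_alt xs th =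
      (bRuns (dropsOf xs)).any (fun r => decide (th ≤ r)) := by
  unfold check_dropping_logits_across_cuts_alt
  rw [PySem.List.slice_from xs (by norm_num : (0:Int) ≤ 1)]
  rfl

-- ===== VERDICT (by name: the statement is the Claim_ definition above) =====
theorem check_dropping_logits_across_cuts_spec : Claim_equal_check_dropping_logits_across_cuts := by
  intro xs th _
  unfold Spec_check_dropping_logits_across_cuts
  rw [alt_eq]
  unfold check_dropping_logits_across_cuts
  by_cases hg : (xs.length : Int) < th + 1
  · rw [if_pos hg]
    by_contra hne
    have hany : (bRuns (dropsOf xs)).any (fun r => decide (th ≤ r)) = true := by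
      cases hh : (bRuns (dropsOf xs)).any (fun r => decide (th ≤ r)) <;> simp_all
    rw [List.any_eq_true] at hany
    obtain ⟨r, hr, hthr⟩ := hany
    have hb := bRuns_mem_bounds (dropsOf xs).length (dropsOf xs) le_rfl r hr
    have hlen : (dropsOf xs).length = xs.length - 1 := by
      simp [dropsOf]
    rw [hlen] at hb
    simp only [decide_eq_true_eq] at hthr
    omega
  · rw [if_neg hg]
    have h0 : ((0 : Nat) : Int) + 1 = (1 : Int) := by norm_num
    have hfr := fold_range xs th xs.length 0 (by omega) (false, 0)
    rw [h0] at hfr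
    rw [hfr, List.drop_zero]
    rw [main_inv th (dropsOf xs) 0 le_rfl]
    simp only [zero_add]
    rw [absorb]
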